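-- pv_equiv track=rewrite | github.com/vincent-vega/adventofcode | 2022/day_15/15.py | _out_of_scope
-- ===== SOURCE A (Python) =====
-- def _manh(x1: int, y1: int, x2: int, y2: int) -> int:
--     return abs(x1 - x2) + abs(y1 - y2)
--
-- def _out_of_scope(sx: int, sy: int, bx: int, by: int, M: int) -> set[tuple[int, int]]:
--     '''
--     Return every position whose distance from the sensor is radius + 1
--     '''
--     d = _manh(sx, sy, bx, by) + 1
--     p = set()
--     for dx in filter(lambda dx: 0 <= sx + dx <= M, range(-1 * d, d + 1)):
--         x = sx + dx
--         dy = d - abs(dx)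
--         if dy > 0:
--             if 0 <= sy + dy <= M:
--                 p.add((x, (sy + dy)))
--             if 0 <= sy - dy <= M:
--                 p.add((x, (sy - dy)))
--         elif 0 <= sy <= M:
--             p.add((x, sy))
--     return p
-- ===== SOURCE B (Python) =====
-- def _out_of_scope(sx: int, sy: int, bx: int, by: int, M: int) -> set[tuple[int, int]]:
--     '''
--     Return every position whose distance from the sensor is radius + 1
--     '''
--     d = abs(sx - bx) + abs(sy - by) + 1
--     # walk the upper edge chain of the diamond: from the left corner,
--     # d unit steps up-right, then d unit steps down-right
--     top = [(sx - d, sy)]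
--     x, y = sx - d, sy
--     for dx, dy in [(1, 1)] * d + [(1, -1)] * d:
--         x, y = x + dx, y + dy
--         top.append((x, y))
--     # walk the lower edge chain: d unit steps down-right, then d up-right
--     bot = [(sx - d, sy)]
--     x, y = sx - d, sy
--     for dx, dy in [(1, -1)] * d + [(1, 1)] * d:
--         x, y = x + dx, y + dy
--         bot.append((x, y))
--     p = set()
--     for pair in zip(top, bot):
--         for q in pair:
--             if 0 <= q[0] <= M and 0 <= q[1] <= M:
--                 p.add(q)
--     return p
-- ===== Notes on version B (the rewrite author's own statement) =====
-- stated objective: alternative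
-- what changed: B builds the two diagonal edge chains of the radius-(d) diamond by walking unit direction steps from the left corner (staged passes: generate chains, then zip the columns and clip to the bounds), instead of A's single column sweep that filters the dx range and computes the height d-|dx| with branching per column.
import Mathlib
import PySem

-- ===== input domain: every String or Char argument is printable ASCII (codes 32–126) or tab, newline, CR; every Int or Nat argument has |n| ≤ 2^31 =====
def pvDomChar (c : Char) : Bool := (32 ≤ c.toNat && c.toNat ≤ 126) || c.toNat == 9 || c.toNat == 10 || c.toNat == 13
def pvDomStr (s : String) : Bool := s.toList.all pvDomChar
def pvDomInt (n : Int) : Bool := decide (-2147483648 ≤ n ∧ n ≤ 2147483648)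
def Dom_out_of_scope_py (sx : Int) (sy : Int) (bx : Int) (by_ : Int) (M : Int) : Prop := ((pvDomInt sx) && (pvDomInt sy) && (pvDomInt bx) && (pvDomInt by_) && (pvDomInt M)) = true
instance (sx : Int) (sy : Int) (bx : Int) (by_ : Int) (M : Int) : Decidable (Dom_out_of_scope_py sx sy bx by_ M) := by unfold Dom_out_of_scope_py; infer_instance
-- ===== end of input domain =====

-- B generates the perimeter by walking the two diagonal edge chains of the diamond with
-- unit direction steps and clipping the zipped columns, instead of A's column sweep that
-- computes d - |dx| per column (alternative traversal, same cost).

-- ===== PORT A =====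
-- _manh(x1, y1, x2, y2) = abs(x1 - x2) + abs(y1 - y2)
def manh_py (x1 : Int) (y1 : Int) (x2 : Int) (y2 : Int) : Int := |x1 - x2| + |y1 - y2|

def out_of_scope_py (sx : Int) (sy : Int) (bx : Int) (by_ : Int) (M : Int) : List (Int × Int) :=
  let d := manh_py sx sy bx by_ + 1
  ((PySem.List.pyRange (-1 * d) (d + 1) 1).filter
      (fun dx => decide (0 ≤ sx + dx) && decide (sx + dx ≤ M))).foldl
    (fun p dx =>
      let x := sx + dx
      let dy := d - |dx|
      if dy > 0 then
        let p := if 0 ≤ sy + dy ∧ sy + dy ≤ M then PySem.Set.add p (x, sy + dy) else p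
        if 0 ≤ sy - dy ∧ sy - dy ≤ M then PySem.Set.add p (x, sy - dy) else p
      else if 0 ≤ sy ∧ sy ≤ M then PySem.Set.add p (x, sy) else p)
    PySem.Set.empty

-- ===== PORT B =====
-- the chain-walking loop of Source B: advance the cursor (x, y) by each step and append it;
-- the growing list is carried cons-first and reversed at the end (Python's O(1) append)
def pvWalk (p0 : Int × Int) (steps : List (Int × Int)) : List (Int × Int) :=
  (steps.foldl
    (fun (st : (Int × Int) × List (Int × Int)) s =>
      ((st.1.1 + s.1, st.1.2 + s.2), (st.1.1 + s.1, st.1.2 + s.2) :: st.2))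
    (p0, [p0])).2.reverse

def out_of_scope_py_alt (sx : Int) (sy : Int) (bx : Int) (by_ : Int) (M : Int) : List (Int × Int) :=
  let d := |sx - bx| + |sy - by_| + 1
  let top := pvWalk (sx - d, sy)
    (List.replicate d.toNat (1, 1) ++ List.replicate d.toNat (1, -1))
  let bot := pvWalk (sx - d, sy)
    (List.replicate d.toNat (1, -1) ++ List.replicate d.toNat (1, 1))
  -- zip(top, bot); List.zipWith Prod.mk, the tail-recursion-friendly spelling of List.zip
  (List.zipWith Prod.mk top bot).foldl
    (fun p pr =>
      [pr.1, pr.2].foldl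
        (fun p q =>
          if 0 ≤ q.1 ∧ q.1 ≤ M ∧ 0 ≤ q.2 ∧ q.2 ≤ M then PySem.Set.add p q else p)
        p)
    PySem.Set.empty

-- ===== PRECONDITION & SPEC =====
def Spec_out_of_scope_py (sx : Int) (sy : Int) (bx : Int) (by_ : Int) (M : Int) (out : List (Int × Int)) : Prop := out = out_of_scope_py_alt sx sy bx by_ M
instance (sx : Int) (sy : Int) (bx : Int) (by_ : Int) (M : Int) (out : List (Int × Int)) : Decidable (Spec_out_of_scope_py sx sy bx by_ M out) := by unfold Spec_out_of_scope_py; infer_instance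

-- ===== CLAIM (what is proved, stated in full; the proofs are below) =====
def Claim_equal_out_of_scope_py : Prop := ∀ (sx : Int) (sy : Int) (bx : Int) (by_ : Int) (M : Int), Dom_out_of_scope_py sx sy bx by_ M → Spec_out_of_scope_py sx sy bx by_ M (out_of_scope_py sx sy bx by_ M)

-- ===== LEMMAS AND PROOFS =====

-- walking m equal steps from cursor c conses the m partial sums (newest first)
-- onto the carried list, and the final cursor is c + m * st
theorem pv_walk_rep (st : Int × Int) (m : Nat) (c : Int × Int) (racc : List (Int × Int)) :
    (List.replicate m st).foldl
        (fun (p : (Int × Int) × List (Int × Int)) s =>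
          ((p.1.1 + s.1, p.1.2 + s.2), (p.1.1 + s.1, p.1.2 + s.2) :: p.2)) (c, racc)
      = ((c.1 + st.1 * m, c.2 + st.2 * m),
        ((List.range m).map
            (fun i : Nat => (c.1 + st.1 * ((i : Int) + 1), c.2 + st.2 * ((i : Int) + 1)))).reverse
          ++ racc) := by
  induction m generalizing c racc with
  | zero => simp
  | succ m ih =>
    rw [List.replicate_succ, List.foldl_cons]
    dsimp only
    rw [ih]
    have hmap : (List.range (m + 1)).map
          (fun i : Nat => (c.1 + st.1 * ((i : Int) + 1), c.2 + st.2 * ((i : Int) + 1)))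
        = (c.1 + st.1, c.2 + st.2) :: (List.range m).map
          (fun i : Nat => ((c.1 + st.1) + st.1 * ((i : Int) + 1), (c.2 + st.2) + st.2 * ((i : Int) + 1))) := by
      rw [List.range_succ_eq_map, List.map_cons, List.map_map]
      refine congrArg₂ _ (by norm_num) (List.map_congr_left ?_)
      intro i _
      refine Prod.ext ?_ ?_ <;> · dsimp only [Function.comp_apply]; push_cast; ring
    rw [hmap, List.reverse_cons, List.append_assoc, List.singleton_append]
    refine congrArg₂ Prod.mk (Prod.ext ?_ ?_) rfl <;> · dsimp only; push_cast; ring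

-- closed form of a full two-edge chain: m diagonal steps of slope sgn, then m of slope -sgn
theorem pv_walk_closed (p : Int × Int) (sgn : Int) (m : Nat) :
    pvWalk p (List.replicate m (1, sgn) ++ List.replicate m (1, -sgn))
      = (List.range (2 * m + 1)).map
          (fun i : Nat => (p.1 + (i : Int), p.2 + sgn * ((m : Int) - |(i : Int) - (m : Int)|))) := by
  unfold pvWalk
  rw [List.foldl_append, pv_walk_rep, pv_walk_rep, List.reverse_append, List.reverse_append,
    List.reverse_reverse, List.reverse_reverse, List.reverse_singleton]
  have hsplit : ∀ F : Nat → Int × Int, (List.range (2 * m + 1)).map F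
      = F 0 :: ((List.range m).map (fun i => F (i + 1))
          ++ (List.range m).map (fun i => F (m + 1 + i))) := by
    intro F
    rw [show 2 * m + 1 = (m + 1) + m by omega, List.range_add, List.map_append,
      List.range_succ_eq_map, List.map_cons, List.map_map, List.map_map, List.cons_append]
    rfl
  rw [hsplit, List.singleton_append]
  refine congrArg₂ List.cons (Prod.ext (by simp) (by simp)) ?_
  show (_ : List (Int × Int)) ++ (_ : List (Int × Int)) = _ ++ _
  refine congrArg₂ (· ++ ·) ?_ ?_
  · refine List.map_congr_left ?_
    intro i hi
    have hi' : i < m := List.mem_range.mp hi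
    refine Prod.ext (by dsimp only; push_cast; ring) ?_
    have ha : |((i + 1 : Nat) : Int) - (m : Int)| = (m : Int) - ((i : Int) + 1) := by
      rw [abs_of_nonpos (by push_cast; omega)]; push_cast; ring
    dsimp only
    rw [ha]; ring
  · refine List.map_congr_left ?_
    intro i _
    refine Prod.ext (by dsimp only; push_cast; ring) ?_
    have ha : |((m + 1 + i : Nat) : Int) - (m : Int)| = (i : Int) + 1 := by
      rw [abs_of_nonneg (by push_cast; omega)]; push_cast; ring
    dsimp only
    rw [ha]; ring

-- ===== VERDICT (by name: the statement is the Claim_ definition above) =====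
theorem out_of_scope_py_spec : Claim_equal_out_of_scope_py := by
  intro sx sy bx by_ M _
  unfold Spec_out_of_scope_py
  simp only [out_of_scope_py, out_of_scope_py_alt, manh_py]
  have ha1 := abs_nonneg (sx - bx)
  have ha2 := abs_nonneg (sy - by_)
  obtain ⟨n, hn⟩ : ∃ n : Nat, ((n : Int)) = |sx - bx| + |sy - by_| + 1 :=
    ⟨(|sx - bx| + |sy - by_| + 1).toNat, Int.toNat_of_nonneg (by omega)⟩
  rw [← hn, Int.toNat_natCast]
  -- B side: closed forms of the two chains, zip of maps, fold over the index range
  have htop := pv_walk_closed (sx - (n : Int), sy) 1 n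
  have hbot := pv_walk_closed (sx - (n : Int), sy) (-1) n
  simp only [neg_neg] at hbot
  rw [htop, hbot, List.zipWith_map, List.zipWith_self, List.foldl_map]
  -- A side: the filtered pyRange as a guarded fold over the same index range
  rw [PySem.List.pyRange_one,
    show ((n : Int) + 1 - (-1 * (n : Int))) = ((2 * n + 1 : Nat) : Int) by push_cast; ring,
    Int.toNat_natCast, List.filter_map, List.foldl_map, List.foldl_filter]
  -- both sides: a fold over List.range (2*n+1); compare the step functions pointwise
  refine PySem.List.foldl_congr_mem' _ _ _ _ ?_
  intro k hk acc
  have hk' : k < 2 * n + 1 := List.mem_range.mp hk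
  simp only [Function.comp_apply, List.foldl_cons, List.foldl_nil]
  -- normalise the column abscissa and the height
  have hx : sx + (-1 * (n : Int) + (k : Int)) = sx - (n : Int) + (k : Int) := by ring
  have habs : |(-1 * (n : Int) + (k : Int))| = |(k : Int) - (n : Int)| := by
    rw [show (-1 * (n : Int) + (k : Int)) = (k : Int) - (n : Int) by ring]
  simp only [hx, habs]
  set x := sx - (n : Int) + (k : Int) with hxdef
  set e := (n : Int) - |(k : Int) - (n : Int)| with hedef
  have he0 : 0 ≤ e := by
    rw [hedef]
    rcases abs_cases ((k : Int) - (n : Int)) with ⟨h1, h2⟩ | ⟨h1, h2⟩ <;> omega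
  simp only [one_mul, neg_one_mul, ← sub_eq_add_neg]
  by_cases hxb : 0 ≤ x ∧ x ≤ M
  · have hgt : (decide (0 ≤ x) && decide (x ≤ M)) = true := by
      rw [Bool.and_eq_true, decide_eq_true_eq, decide_eq_true_eq]; exact hxb
    rw [if_pos hgt]
    rcases eq_or_lt_of_le he0 with he | he
    · -- corner column: e = 0, both candidate points are (x, sy)
      rw [if_neg (by omega : ¬ e > 0), ← he, add_zero, sub_zero]
      by_cases hy : 0 ≤ sy ∧ sy ≤ M
      · rw [if_pos hy, if_pos ⟨hxb.1, hxb.2, hy.1, hy.2⟩, if_pos ⟨hxb.1, hxb.2, hy.1, hy.2⟩]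
        exact (PySem.Set.add_of_mem ((PySem.Set.mem_add _ _ _).mpr (Or.inr rfl))).symm
      · have hy' : ¬ (0 ≤ x ∧ x ≤ M ∧ 0 ≤ sy ∧ sy ≤ M) := fun h => hy ⟨h.2.2.1, h.2.2.2⟩
        rw [if_neg hy, if_neg hy', if_neg hy']
    · -- interior column: two distinct candidate points
      rw [if_pos he]
      by_cases h1 : 0 ≤ sy + e ∧ sy + e ≤ M <;> by_cases h2 : 0 ≤ sy - e ∧ sy - e ≤ M
      all_goals
        first
        | rw [if_pos h1] | rw [if_neg h1]
      all_goals
        first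
        | rw [if_pos h2] | rw [if_neg h2]
      all_goals
        first
        | rw [if_pos (show 0 ≤ x ∧ x ≤ M ∧ 0 ≤ sy - e ∧ sy - e ≤ M from ⟨hxb.1, hxb.2, h2.1, h2.2⟩)]
        | rw [if_neg (show ¬(0 ≤ x ∧ x ≤ M ∧ 0 ≤ sy - e ∧ sy - e ≤ M) from fun h => h2 ⟨h.2.2.1, h.2.2.2⟩)]
      all_goals
        first
        | rw [if_pos (show 0 ≤ x ∧ x ≤ M ∧ 0 ≤ sy + e ∧ sy + e ≤ M from ⟨hxb.1, hxb.2, h1.1, h1.2⟩)]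
        | rw [if_neg (show ¬(0 ≤ x ∧ x ≤ M ∧ 0 ≤ sy + e ∧ sy + e ≤ M) from fun h => h1 ⟨h.2.2.1, h.2.2.2⟩)]
  · -- column out of the x-range: neither side adds anything
    have hg : (decide (0 ≤ x) && decide (x ≤ M)) = false := by
      rcases not_and_or.mp hxb with h | h
      · rw [decide_eq_false h, Bool.false_and]
      · rw [decide_eq_false h, Bool.and_false]
    rw [hg, if_neg (by exact Bool.false_ne_true)]
    rw [if_neg (fun h => hxb ⟨h.1, h.2.1⟩), if_neg (fun h => hxb ⟨h.1, h.2.1⟩)]
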